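-- pv_equiv track=rewrite | github.com/EliEhrman/agent | bitvec.py | create_word_dict
-- ===== SOURCE A (Python) =====
-- def create_word_dict(phrase_list, max_process):
-- 	d_els, l_presence, l_phrase_ids = dict(), [], []
-- 	for iphrase, phrase in enumerate(phrase_list):
-- 		if iphrase > max_process:
-- 			break
-- 		for iel, el, in enumerate(phrase):
-- 			id = d_els.get(el, -1)
-- 			if id == -1:
-- 				d_els[el] = len(d_els)
-- 				l_presence.append(1)
-- 				l_phrase_ids.append([])
-- 			else:
-- 				l_presence[id] += 1
-- 				# l_phrase_ids[id].append(iphrase)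
--
--
-- 	return d_els, l_presence, l_phrase_ids
-- ===== SOURCE B (Python) =====
-- from itertools import islice
-- from collections import Counter
--
-- def create_word_dict(phrase_list, max_process):
-- 	counts = Counter(el for phrase in islice(phrase_list, max(0, max_process + 1))
-- 	                 for el in phrase)
-- 	d_els = {el: i for i, el in enumerate(counts)}
-- 	l_presence = list(counts.values())
-- 	l_phrase_ids = [[] for _ in counts]
-- 	return d_els, l_presence, l_phrase_ids
-- ===== Notes on version B (the rewrite author's own statement) =====
-- stated objective: idiomatic
-- what changed: Replaces the interleaved new/seen branch loop by a count-table-first decomposition: one Counter over the flattened islice prefix, then three separate passes build the index dict, the presence list and the empty id lists.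
import Mathlib
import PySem

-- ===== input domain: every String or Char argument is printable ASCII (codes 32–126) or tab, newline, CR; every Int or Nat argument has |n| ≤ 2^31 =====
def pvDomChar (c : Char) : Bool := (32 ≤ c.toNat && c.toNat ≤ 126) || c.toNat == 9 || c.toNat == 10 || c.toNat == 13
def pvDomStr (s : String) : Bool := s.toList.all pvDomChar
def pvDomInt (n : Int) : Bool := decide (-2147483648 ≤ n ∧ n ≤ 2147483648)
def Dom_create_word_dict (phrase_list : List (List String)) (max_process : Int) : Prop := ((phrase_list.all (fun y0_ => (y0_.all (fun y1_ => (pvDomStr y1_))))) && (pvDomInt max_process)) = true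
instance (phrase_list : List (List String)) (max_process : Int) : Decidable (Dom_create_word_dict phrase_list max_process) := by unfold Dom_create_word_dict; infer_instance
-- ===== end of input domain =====

-- B replaces A's interleaved new/seen branching by a Counter built first, then three separate output passes (idiomatic decomposition; same cost).

-- ===== PORT A =====
-- one inner-loop step of A: state = (d_els, l_presence, l_phrase_ids)
def cwdStep (s : PySem.Dict String Int × List Int × List (List Int)) (el : String) :
    PySem.Dict String Int × List Int × List (List Int) :=
  let id := s.1.getD el (-1)
  if id = -1 then
    (s.1.insert el (s.1.size : Int), s.2.1 ++ [1], s.2.2 ++ [[]])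
  else
    (s.1, s.2.1.set id.toNat (s.2.1.getD id.toNat 0 + 1), s.2.2)

-- the outer 'for iphrase, phrase in enumerate(...)' with the break
def cwdLoop (mp : Int) : List (Int × List String) →
    PySem.Dict String Int × List Int × List (List Int) →
    PySem.Dict String Int × List Int × List (List Int)
  | [], s => s
  | (i, p) :: rest, s => if i > mp then s else cwdLoop mp rest (p.foldl cwdStep s)

def create_word_dict (phrase_list : List (List String)) (max_process : Int) :
    (List (String × Int)) × List Int × List (List Int) :=
  let s := cwdLoop max_process (PySem.List.enumerate phrase_list) (PySem.Dict.empty, [], [])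
  (s.1.items, s.2.1, s.2.2)

-- ===== PORT B =====
def create_word_dict_alt (phrase_list : List (List String)) (max_process : Int) :
    (List (String × Int)) × List Int × List (List Int) :=
  let counts := PySem.Dict.counter ((phrase_list.take (max 0 (max_process + 1)).toNat).flatten)
  ((PySem.List.enumerate counts.keys).map (fun p => (p.2, p.1)),
   counts.values,
   counts.keys.map (fun _ => []))

-- ===== PRECONDITION & SPEC =====
def Spec_create_word_dict (phrase_list : List (List String)) (max_process : Int) (out : (List (String × Int)) × List Int × List (List Int)) : Prop := out = create_word_dict_alt phrase_list max_process
instance (phrase_list : List (List String)) (max_process : Int) (out : (List (String × Int)) × List Int × List (List Int)) : Decidable (Spec_create_word_dict phrase_list max_process out) := by unfold Spec_create_word_dict; infer_instance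

-- ===== CLAIM (what is proved, stated in full; the proofs are below) =====
def Claim_equal_create_word_dict : Prop := ∀ (phrase_list : List (List String)) (max_process : Int), Dom_create_word_dict phrase_list max_process → Spec_create_word_dict phrase_list max_process (create_word_dict phrase_list max_process)

-- ===== LEMMAS AND PROOFS =====

-- the state A's loop has after consuming the word list l, expressed through Counter data
def cwdState (l : List String) : PySem.Dict String Int × List Int × List (List Int) :=
  (PySem.Dict.mk ((PySem.List.enumerate (PySem.Set.ofList l)).map (fun p => (p.2, p.1))),
   (PySem.Set.ofList l).map (fun k => (l.count k : Int)),
   (PySem.Set.ofList l).map (fun _ => []))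

theorem cwd_get_not_mem (ks : List String) (w : String) (i : Int) (h : w ∉ ks) :
    (PySem.Dict.mk ((PySem.List.enumerate ks i).map (fun p => (p.2, p.1)))).get? w = none := by
  induction ks generalizing i with
  | nil => simp [PySem.List.enumerate_nil, PySem.Dict.get?]
  | cons k ks ih =>
    rw [PySem.List.enumerate_cons, List.map_cons, PySem.Dict.get?_mk_cons]
    have hk : ¬ (k == w) = true := by
      simp only [beq_iff_eq]; rintro rfl; exact h (List.mem_cons_self ..)
    simp only [hk]
    exact ih (i + 1) (by simp_all)

theorem cwd_get_mem (ks : List String) (w : String) (i : Int) (j : Nat)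
    (hn : ks.Nodup) (hj : ks[j]? = some w) :
    (PySem.Dict.mk ((PySem.List.enumerate ks i).map (fun p => (p.2, p.1)))).get? w = some (i + j) := by
  induction ks generalizing i j with
  | nil => simp at hj
  | cons k ks ih =>
    rw [PySem.List.enumerate_cons, List.map_cons, PySem.Dict.get?_mk_cons]
    cases j with
    | zero =>
      simp at hj
      simp [hj]
    | succ j =>
      simp at hj
      have hw : w ∈ ks := List.mem_of_getElem? hj
      have hk : ¬ (k == w) = true := by
        simp only [beq_iff_eq]
        intro h; subst h; exact (List.nodup_cons.mp hn).1 hw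
      simp only [hk]
      rw [ih (i + 1) j (List.nodup_cons.mp hn).2 hj]
      push_cast
      ring_nf

theorem cwd_set_map (ks : List String) (w : String) (j : Nat) (f : String → Int)
    (hn : ks.Nodup) (hj : ks[j]? = some w) :
    (ks.map f).set j (f w + 1) = ks.map (fun k => f k + if k = w then 1 else 0) := by
  induction ks generalizing j with
  | nil => simp at hj
  | cons k ks ih =>
    cases j with
    | zero =>
      simp at hj
      subst hj
      simp only [List.map_cons, List.set_cons_zero]
      congr 1
      apply List.map_congr_left
      intro x hx
      have hxk : ¬ x = k := by rintro rfl; exact (List.nodup_cons.mp hn).1 hx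
      simp [hxk]
    | succ j =>
      simp at hj
      have hw : w ∈ ks := List.mem_of_getElem? hj
      have hk : ¬ k = w := by rintro rfl; exact (List.nodup_cons.mp hn).1 hw
      simp only [List.map_cons, List.set_cons_succ, hk, if_false, add_zero]
      rw [ih j (List.nodup_cons.mp hn).2 hj]

theorem cwd_step_state (l : List String) (w : String) :
    cwdStep (cwdState l) w = cwdState (l ++ [w]) := by
  have hofl : PySem.Set.ofList (l ++ [w]) = PySem.Set.add (PySem.Set.ofList l) w :=
    PySem.Set.ofList_append_singleton ..
  by_cases hmem : w ∈ PySem.Set.ofList l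
  · -- already seen: index j of w among the keys
    obtain ⟨j, hjlt, hj⟩ := List.getElem_of_mem hmem
    have hj' : (PySem.Set.ofList l)[j]? = some w := by
      rw [List.getElem?_eq_getElem hjlt, hj]
    have hget := cwd_get_mem (PySem.Set.ofList l) w 0 j (PySem.Set.nodup_ofList l) hj'
    have hadd : PySem.Set.add (PySem.Set.ofList l) w = PySem.Set.ofList l := by
      simp [PySem.Set.add, hmem]
    have hid : ((0 : Int) + j ≠ -1) := by omega
    simp only [cwdStep, cwdState, PySem.Dict.getD, hget, Option.getD_some, if_neg hid,
      hofl, hadd]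
    simp only [Prod.mk.injEq]
    refine ⟨trivial, ?_, trivial⟩
    have htn : ((0 : Int) + (j : Int)).toNat = j := by omega
    rw [htn]
    have hgd : ((PySem.Set.ofList l).map (fun k => (l.count k : Int))).getD j 0 = (l.count w : Int) := by
      rw [List.getD_eq_getElem?_getD, List.getElem?_map, hj']
      rfl
    rw [hgd, cwd_set_map (PySem.Set.ofList l) w j _ (PySem.Set.nodup_ofList l) hj']
    apply List.map_congr_left
    intro k hk
    simp only [List.count_append]
    by_cases hkw : k = w
    · subst hkw; simp
    · have h0 : List.count k [w] = 0 := List.count_eq_zero.mpr (by simp [hkw])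
      simp [hkw, h0]
  · -- new word
    have hwl : w ∉ l := fun h => hmem ((PySem.Set.mem_ofList l w).mpr h)
    have hget := cwd_get_not_mem (PySem.Set.ofList l) w 0 hmem
    have hadd : PySem.Set.add (PySem.Set.ofList l) w = PySem.Set.ofList l ++ [w] := by
      simp [PySem.Set.add, hmem]
    have hcon : (PySem.Dict.mk ((PySem.List.enumerate (PySem.Set.ofList l) 0).map
        (fun p => (p.2, p.1)))).contains w = false := by
      rw [← PySem.Dict.get?_eq_none_iff_contains]
      exact hget
    simp only [cwdStep, cwdState, PySem.Dict.getD, hget, Option.getD_none, reduceIte,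
      hofl, hadd, Prod.mk.injEq]
    refine ⟨?_, ?_, ?_⟩
    · -- dict component
      apply PySem.Dict.ext
      simp only [PySem.Dict.insert, hcon]
      have hsz : (PySem.Dict.mk ((PySem.List.enumerate (PySem.Set.ofList l) 0).map
          (fun p => (p.2, p.1)))).size = ((PySem.Set.ofList l).length : Int) := by
        simp [PySem.Dict.size, PySem.List.length_enumerate]
      rw [PySem.List.enumerate_append]
      simp [PySem.List.enumerate_cons, PySem.Dict.size, PySem.List.length_enumerate]
    · -- presence component
      rw [List.map_append]
      congr 1
      · apply List.map_congr_left
        intro k hk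
        have hkw : ¬ k = w := by rintro rfl; exact hmem hk
        have h0 : List.count k [w] = 0 := List.count_eq_zero.mpr (by simp [hkw])
        simp [List.count_append, h0]
      · have : l.count w = 0 := List.count_eq_zero.mpr hwl
        simp [List.count_append, this]
    · simp

theorem cwd_fold_state (ws l : List String) :
    ws.foldl cwdStep (cwdState l) = cwdState (l ++ ws) := by
  induction ws generalizing l with
  | nil => simp
  | cons w ws ih => rw [List.foldl_cons, cwd_step_state, ih, List.append_assoc]; rfl

theorem cwd_loop_take (mp : Int) (pl : List (List String)) (i : Int) s :
    cwdLoop mp (PySem.List.enumerate pl i) s =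
      (pl.take (mp + 1 - i).toNat).foldl (fun s p => p.foldl cwdStep s) s := by
  induction pl generalizing i s with
  | nil => simp [PySem.List.enumerate_nil, cwdLoop]
  | cons p pl ih =>
    rw [PySem.List.enumerate_cons]
    show cwdLoop mp _ s = _
    by_cases h : i > mp
    · have : (mp + 1 - i).toNat = 0 := by omega
      simp [cwdLoop, h, this]
    · have : (mp + 1 - i).toNat = (mp + 1 - (i + 1)).toNat + 1 := by omega
      rw [this, List.take_succ_cons, List.foldl_cons]
      simp only [cwdLoop, if_neg h]
      exact ih (i + 1) _

-- ===== VERDICT (by name: the statement is the Claim_ definition above) =====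
theorem create_word_dict_spec : Claim_equal_create_word_dict := by
  intro pl mp _
  show create_word_dict pl mp = create_word_dict_alt pl mp
  unfold create_word_dict create_word_dict_alt
  rw [cwd_loop_take]
  have hmax : (max 0 (mp + 1)).toNat = (mp + 1 - 0).toNat := by omega
  rw [hmax, ← List.foldl_flatten]
  have h0 : ((PySem.Dict.empty : PySem.Dict String Int), ([] : List Int),
      ([] : List (List Int))) = cwdState [] := rfl
  rw [h0, cwd_fold_state, List.nil_append]
  simp only [cwdState, PySem.Dict.keys_counter, PySem.Dict.values,
    PySem.Dict.items_counter, List.map_map, Prod.mk.injEq]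
  exact ⟨trivial, rfl, trivial⟩
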